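-- pv_equiv track=rewrite | github.com/yashasvikaa/advent-of-code | 2024/day4_part1.py | diagonal_right
-- ===== SOURCE A (Python) =====
-- def diagonal_right(grid):
--     sum = 0
--     for i in range(3, len(grid)):
--         for j in range(0, len(grid) - 3):
--             word = (grid[i][j] + grid[i-1][j+1] + grid[i-2][j+2] + grid[i-3][j+3])
--             if word == "XMAS" or word == "SAMX":
--                 sum+=1
--     return sum
-- ===== SOURCE B (Python) =====
-- def diagonal_right(grid):
--     n = len(grid)
--     total = 0
--     for d in range(3, 2 * n - 4):
--         lo = max(0, d - n + 1)
--         hi = min(d, n - 1)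
--         s = ''.join(grid[i][d - i] for i in range(hi, lo - 1, -1))
--         for p in range(len(s) - 3):
--             w = s[p:p + 4]
--             if w == "XMAS" or w == "SAMX":
--                 total += 1
--     return total
-- ===== Notes on version B (the rewrite author's own statement) =====
-- stated objective: alternative
-- what changed: Instead of testing a 4-cell window at every (i,j) with four separate grid lookups and a string concatenation, B extracts each up-right anti-diagonal once as a string and slides a 4-character window over it, counting XMAS/SAMX occurrences per diagonal.
import Mathlib
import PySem

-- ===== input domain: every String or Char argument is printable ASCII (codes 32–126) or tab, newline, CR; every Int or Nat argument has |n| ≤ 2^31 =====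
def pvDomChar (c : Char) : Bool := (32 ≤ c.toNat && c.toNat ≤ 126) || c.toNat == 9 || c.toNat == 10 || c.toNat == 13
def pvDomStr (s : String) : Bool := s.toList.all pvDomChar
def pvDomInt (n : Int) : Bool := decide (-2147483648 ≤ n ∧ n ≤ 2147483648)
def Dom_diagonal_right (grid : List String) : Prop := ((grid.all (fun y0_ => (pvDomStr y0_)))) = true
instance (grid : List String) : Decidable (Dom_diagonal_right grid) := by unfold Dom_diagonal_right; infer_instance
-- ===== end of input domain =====

-- B replaces A's per-cell window test (four indexed lookups at every (i,j)) by extracting each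
-- up-right anti-diagonal once as a string and sliding a 4-character window over it (objective: alternative decomposition).

-- grid[i][j] (both indices known in range under Pre_; default values are never the returned chars there)
def pvCell (grid : List String) (i j : Int) : Char :=
  PySem.List.pyGetD (PySem.List.pyGetD grid i "").toList j ' '

-- ===== PORT A =====
def diagonal_right (grid : List String) : Int :=
  (PySem.List.pyRange 3 grid.length 1).foldl (fun acc i =>
    (PySem.List.pyRange 0 ((grid.length : Int) - 3) 1).foldl (fun acc j =>
      if [pvCell grid i j, pvCell grid (i-1) (j+1), pvCell grid (i-2) (j+2), pvCell grid (i-3) (j+3)]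
           = "XMAS".toList
         ∨ [pvCell grid i j, pvCell grid (i-1) (j+1), pvCell grid (i-2) (j+2), pvCell grid (i-3) (j+3)]
           = "SAMX".toList
      then acc + 1 else acc) acc) 0

-- ===== PORT B =====
def diagonal_right_alt (grid : List String) : Int :=
  (PySem.List.pyRange 3 (2 * (grid.length : Int) - 4) 1).foldl (fun acc d =>
    let lo : Int := max 0 (d - grid.length + 1)
    let hi : Int := min d ((grid.length : Int) - 1)
    let s : List Char := (PySem.List.pyRange hi (lo - 1) (-1)).map (fun i => pvCell grid i (d - i))
    (PySem.List.pyRange 0 ((s.length : Int) - 3) 1).foldl (fun acc p =>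
      if PySem.List.slice s (some p) (some (p + 4)) = "XMAS".toList
         ∨ PySem.List.slice s (some p) (some (p + 4)) = "SAMX".toList
      then acc + 1 else acc) acc) 0

-- ===== PRECONDITION & SPEC =====
-- Pre_ excludes exactly the ragged grids on which A raises IndexError: whenever the grid has at
-- least 4 rows, row r must hold every column A reads there, i.e. min(n, 2n-4-r) characters.
def Pre_diagonal_right (grid : List String) : Prop :=
  4 ≤ grid.length →
    ∀ r < grid.length, min grid.length (2 * grid.length - 4 - r) ≤ (grid.getD r "").length
instance (grid : List String) : Decidable (Pre_diagonal_right grid) := by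
  unfold Pre_diagonal_right; infer_instance
def pvWitness_diagonal_right : List String := ["XMAS", "MMMM", "AAAA", "SSSS"]

def Spec_diagonal_right (grid : List String) (out : Int) : Prop := out = diagonal_right_alt grid
instance (grid : List String) (out : Int) : Decidable (Spec_diagonal_right grid out) := by
  unfold Spec_diagonal_right; infer_instance

-- ===== CLAIM (what is proved, stated in full; the proofs are below) =====
def Claim_equal_diagonal_right : Prop := ∀ (grid : List String), Dom_diagonal_right grid → Pre_diagonal_right grid → Spec_diagonal_right grid (diagonal_right grid)

-- ===== LEMMAS AND PROOFS =====

-- the 4-character word read by A at start cell (a+3, b), as a function of Nat coordinates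
def pvWord (grid : List String) (a b : ℕ) : List Char :=
  [pvCell grid ((a : Int) + 3) b, pvCell grid ((a : Int) + 2) ((b : Int) + 1),
   pvCell grid ((a : Int) + 1) ((b : Int) + 2), pvCell grid (a : Int) ((b : Int) + 3)]

-- 0/1 indicator of a hit at start cell (a+3, b)
def pvG (grid : List String) (a b : ℕ) : Int :=
  if pvWord grid a b = "XMAS".toList ∨ pvWord grid a b = "SAMX".toList then 1 else 0

theorem pv_sum_range (M : ℕ) (f : ℕ → Int) :
    ((List.range M).map f).sum = ∑ i ∈ Finset.range M, f i := rfl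

theorem pv_countP_range_cast (q : ℕ → Bool) (M : ℕ) :
    (((List.range M).countP q : ℕ) : Int) = ∑ b ∈ Finset.range M, (if q b then 1 else 0) := by
  rw [← PySem.List.sum_map_ite_one_zero]; rfl

theorem pv_win4 (p L : ℕ) (h : p + 4 ≤ L) (g : ℕ → Char) :
    (((List.range L).map g).drop p).take 4 = [g p, g (p+1), g (p+2), g (p+3)] := by
  rw [← List.map_drop, ← List.map_take, List.range_eq_range', List.drop_range']
  have h4 : L - p = 4 + (L - p - 4) := by omega
  rw [h4, ← List.range'_append, List.take_left']
  · simp [List.range']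
  · simp [List.range']

-- regrouping the m×m start-cell square by anti-diagonals e = a + b
theorem pv_key (m : ℕ) (G : ℕ → ℕ → Int) :
    ∑ a ∈ Finset.range m, ∑ b ∈ Finset.range m, G a b
      = ∑ e ∈ Finset.range (2*m-1), ∑ p ∈ Finset.range (min (e+1) (2*m-1-e)),
          G (min e (m-1) - p) (e - (min e (m-1) - p)) := by
  rw [← Finset.sum_product']
  rw [← Finset.sum_fiberwise_of_maps_to (g := fun q : ℕ × ℕ => q.1 + q.2)
        (t := Finset.range (2*m-1)) ?hmaps]
  case hmaps =>
    intro q hq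
    simp only [Finset.mem_product, Finset.mem_range] at hq ⊢
    omega
  refine Finset.sum_congr rfl (fun e he => ?_)
  simp only [Finset.mem_range] at he
  refine Finset.sum_nbij' (i := fun q : ℕ × ℕ => min e (m-1) - q.1)
    (j := fun p => (min e (m-1) - p, e - (min e (m-1) - p))) ?_ ?_ ?_ ?_ ?_
  · intro q hq
    simp only [Finset.mem_filter, Finset.mem_product, Finset.mem_range] at hq ⊢
    omega
  · intro p hp
    simp only [Finset.mem_filter, Finset.mem_product, Finset.mem_range] at hp ⊢
    omega
  · intro q hq
    simp only [Finset.mem_filter, Finset.mem_product, Finset.mem_range] at hq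
    obtain ⟨⟨h1, h2⟩, h3⟩ := hq
    ext <;> simp <;> omega
  · intro p hp
    simp only [Finset.mem_range] at hp
    dsimp only
    omega
  · intro q hq
    simp only [Finset.mem_filter, Finset.mem_product, Finset.mem_range] at hq
    have h1 : min e (m-1) - (min e (m-1) - q.1) = q.1 := by omega
    rw [h1]
    have h2 : e - q.1 = q.2 := by omega
    rw [h2]

theorem pv_A_sum (grid : List String) :
    diagonal_right grid
      = ∑ a ∈ Finset.range (grid.length - 3), ∑ b ∈ Finset.range (grid.length - 3),
          pvG grid a b := by
  unfold diagonal_right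
  simp only [PySem.List.foldl_ite_add_one, PySem.List.foldl_add]
  rw [PySem.List.pyRange_one 3 grid.length, PySem.List.pyRange_one 0 ((grid.length : Int) - 3)]
  simp only [List.map_map, List.countP_map, Function.comp_def]
  have ht : ((grid.length : Int) - 3).toNat = grid.length - 3 := by omega
  have ht0 : ((grid.length : Int) - 3 - 0).toNat = grid.length - 3 := by omega
  rw [ht, ht0, pv_sum_range, zero_add]
  refine Finset.sum_congr rfl (fun a _ => ?_)
  rw [pv_countP_range_cast]
  refine Finset.sum_congr rfl (fun b _ => ?_)
  unfold pvG pvWord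
  simp only [decide_eq_true_eq]
  ring_nf

theorem pv_B_sum (grid : List String) :
    diagonal_right_alt grid
      = ∑ e ∈ Finset.range (2*(grid.length - 3)-1),
          ∑ p ∈ Finset.range (min (e+1) (2*(grid.length - 3)-1-e)),
            pvG grid (min e (grid.length - 3 - 1) - p) (e - (min e (grid.length - 3 - 1) - p)) := by
  unfold diagonal_right_alt
  simp only [PySem.List.foldl_ite_add_one, PySem.List.foldl_add]
  rw [PySem.List.pyRange_one 3 (2 * (grid.length : Int) - 4)]
  simp only [List.map_map, Function.comp_def]
  have ht : (2 * (grid.length : Int) - 4 - 3).toNat = 2*(grid.length - 3)-1 := by omega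
  rw [ht, pv_sum_range, zero_add]
  refine Finset.sum_congr rfl (fun e he => ?_)
  simp only [Finset.mem_range] at he
  rw [PySem.List.pyRange_neg_one]
  simp only [List.map_map, Function.comp_def, List.length_map, List.length_range]
  have hK : (min (3 + (e:Int)) ((grid.length:Int) - 1) - (max 0 (3 + (e:Int) - (grid.length:Int) + 1) - 1)).toNat
      = min (e+1) (2*(grid.length - 3)-1-e) + 3 := by omega
  rw [hK]
  rw [PySem.List.pyRange_one 0 ((min (e+1) (2*(grid.length - 3)-1-e) + 3 : ℕ) - 3)]
  rw [List.countP_map]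
  simp only [Function.comp_def, zero_add]
  have ht2 : (((min (e+1) (2*(grid.length - 3)-1-e) + 3 : ℕ) : Int) - 3 - 0).toNat
      = min (e+1) (2*(grid.length - 3)-1-e) := by omega
  rw [ht2, pv_countP_range_cast]
  refine Finset.sum_congr rfl (fun p hp => ?_)
  simp only [Finset.mem_range] at hp
  simp only [decide_eq_true_eq]
  have hp4 : ((p:Int)) + 4 = ((p+4 : ℕ) : Int) := by push_cast; ring
  rw [hp4, PySem.List.slice_natCast]
  have h44 : p + 4 - p = 4 := by omega
  rw [h44]
  rw [pv_win4 p (min (e + 1) (2 * (grid.length - 3) - 1 - e) + 3) (by omega)]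
  have hA0 : min (3 + (e:Int)) ((grid.length:Int) - 1) - (p:Int)
      = ((min e (grid.length - 3 - 1) - p : ℕ) : Int) + 3 := by omega
  have hA1 : min (3 + (e:Int)) ((grid.length:Int) - 1) - ((p+1 : ℕ) : Int)
      = ((min e (grid.length - 3 - 1) - p : ℕ) : Int) + 2 := by omega
  have hA2 : min (3 + (e:Int)) ((grid.length:Int) - 1) - ((p+2 : ℕ) : Int)
      = ((min e (grid.length - 3 - 1) - p : ℕ) : Int) + 1 := by omega
  have hA3 : min (3 + (e:Int)) ((grid.length:Int) - 1) - ((p+3 : ℕ) : Int)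
      = ((min e (grid.length - 3 - 1) - p : ℕ) : Int) := by omega
  rw [hA0, hA1, hA2, hA3]
  have hB0 : 3 + (e:Int) - (((min e (grid.length - 3 - 1) - p : ℕ) : Int) + 3)
      = ((e - (min e (grid.length - 3 - 1) - p) : ℕ) : Int) := by omega
  have hB1 : 3 + (e:Int) - (((min e (grid.length - 3 - 1) - p : ℕ) : Int) + 2)
      = ((e - (min e (grid.length - 3 - 1) - p) : ℕ) : Int) + 1 := by omega
  have hB2 : 3 + (e:Int) - (((min e (grid.length - 3 - 1) - p : ℕ) : Int) + 1)
      = ((e - (min e (grid.length - 3 - 1) - p) : ℕ) : Int) + 2 := by omega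
  have hB3 : 3 + (e:Int) - (((min e (grid.length - 3 - 1) - p : ℕ) : Int))
      = ((e - (min e (grid.length - 3 - 1) - p) : ℕ) : Int) + 3 := by omega
  rw [hB0, hB1, hB2, hB3]
  rfl

-- ===== VERDICT (by name: the statement is the Claim_ definition above) =====
theorem diagonal_right_spec : Claim_equal_diagonal_right := by
  intro grid _ _
  unfold Spec_diagonal_right
  rw [pv_A_sum, pv_B_sum, pv_key (grid.length - 3) (pvG grid)]
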